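-- pv_equiv track=rewrite | github.com/healthonrails/annolid | annolid/utils/citations.py | _is_balanced_braces
-- ===== SOURCE A (Python) =====
-- def _is_balanced_braces(value: str) -> bool:
--     depth = 0
--     in_quote = False
--     escape = False
--     for ch in value:
--         if in_quote:
--             if escape:
--                 escape = False
--             elif ch == "\\":
--                 escape = True
--             elif ch == '"':
--                 in_quote = False
--             continue
--         if ch == '"':
--             in_quote = True
--             continue
--         if ch == "{":
--             depth += 1
--         elif ch == "}":
--             depth -= 1
--             if depth < 0:
--                 return False
--     return depth == 0 and not in_quote
-- ===== SOURCE B (Python) =====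
-- def _is_balanced_braces(value: str) -> bool:
--     # Two-pass: first delete all escape-aware quoted string literals
--     # (None if a quote is unterminated), then count braces in the remainder.
--     cleaned = _strip_quoted(value)
--     if cleaned is None:
--         return False
--     depth = 0
--     for c in cleaned:
--         if c == "{":
--             depth += 1
--         elif c == "}":
--             depth -= 1
--             if depth < 0:
--                 return False
--     return depth == 0
--
--
-- def _strip_quoted(s):
--     out = []
--     i, n = 0, len(s)
--     while i < n:
--         c = s[i]
--         if c == '"':
--             i += 1
--             closed = False
--             while i < n:
--                 if s[i] == "\\":
--                     i += 2
--                 elif s[i] == '"':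
--                     i += 1
--                     closed = True
--                     break
--                 else:
--                     i += 1
--             if not closed:
--                 return None
--         else:
--             out.append(c)
--             i += 1
--     return "".join(out)
-- ===== Notes on version B (the rewrite author's own statement) =====
-- stated objective: alternative
-- what changed: A's single interleaved quote/escape/brace state machine is replaced by a two-pass decomposition: first strip all escape-aware double-quoted literals (failing on an unterminated quote), then count braces in the cleaned text.
import Mathlib
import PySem

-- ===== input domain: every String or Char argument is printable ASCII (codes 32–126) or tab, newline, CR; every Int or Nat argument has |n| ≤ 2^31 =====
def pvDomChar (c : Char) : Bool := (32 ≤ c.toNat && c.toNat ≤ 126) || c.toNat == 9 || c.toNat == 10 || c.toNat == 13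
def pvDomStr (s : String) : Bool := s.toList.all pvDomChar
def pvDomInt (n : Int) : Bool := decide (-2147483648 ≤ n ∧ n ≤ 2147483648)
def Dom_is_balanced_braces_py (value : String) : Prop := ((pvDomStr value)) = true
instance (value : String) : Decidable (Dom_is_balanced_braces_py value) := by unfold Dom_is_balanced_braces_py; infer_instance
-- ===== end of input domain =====

-- B replaces A's one-pass quote/escape/brace state machine by a two-pass
-- decomposition (strip quoted literals, then count braces); objective: alternative.

-- ===== PORT A =====
-- A's single loop over the characters with state (depth, in_quote, escape);
-- the early `return False` on negative depth is the `false` branch.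
def isBalancedLoopA : List Char → Int → Bool → Bool → Bool
  | [], depth, in_quote, _escape => depth == 0 && !in_quote
  | ch :: rest, depth, in_quote, escape =>
    if in_quote then
      if escape then isBalancedLoopA rest depth in_quote false
      else if ch == '\\' then isBalancedLoopA rest depth in_quote true
      else if ch == '"' then isBalancedLoopA rest depth false escape
      else isBalancedLoopA rest depth in_quote escape
    else if ch == '"' then isBalancedLoopA rest depth true escape
    else if ch == '{' then isBalancedLoopA rest (depth + 1) in_quote escape
    else if ch == '}' then
      if depth - 1 < 0 then false
      else isBalancedLoopA rest (depth - 1) in_quote escape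
    else isBalancedLoopA rest depth in_quote escape

def is_balanced_braces_py (value : String) : Bool :=
  isBalancedLoopA value.toList 0 false false

-- ===== PORT B =====
-- Source B's inner while loop: consume the body of a quoted literal after an opening
-- '"'; a backslash skips the next character; `none` = unterminated (B returns None).
def skipQuoted : List Char → Option (List Char)
  | [] => none
  | c :: rest =>
    if c == '\\' then
      match rest with
      | [] => none
      | _ :: rest' => skipQuoted rest'
    else if c == '"' then some rest
    else skipQuoted rest

-- termination measure for stripQuoted (cited by its decreasing_by):
-- the suffix after a skipped literal is strictly shorter.
theorem skipQuoted_length_aux : ∀ (n : Nat) (l : List Char), l.length ≤ n →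
    ∀ r, skipQuoted l = some r → r.length < l.length := by
  intro n
  induction n with
  | zero =>
      intro l hl r h
      cases l with
      | nil => simp [skipQuoted] at h
      | cons c rest => simp at hl
  | succ n ih =>
      intro l hl r h
      cases l with
      | nil => simp [skipQuoted] at h
      | cons c rest =>
          by_cases h1 : c = '\\'
          · cases rest with
            | nil => simp [skipQuoted, h1] at h
            | cons d rest' =>
                simp only [skipQuoted, h1] at h
                simp only [beq_self_eq_true, if_true] at h
                have hlen : rest'.length ≤ n := by
                  simp only [List.length_cons] at hl; omega
                have := ih rest' hlen r h
                simp only [List.length_cons]; omega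
          · by_cases h2 : c = '"'
            · rw [skipQuoted.eq_def] at h
              have hr : rest = r := by simpa [h1, h2] using h
              simp [← hr]
            · rw [skipQuoted.eq_def] at h
              have hr : skipQuoted rest = some r := by
                simpa [h1, h2] using h
              have hlen : rest.length ≤ n := by
                simp only [List.length_cons] at hl; omega
              have := ih rest hlen r hr
              simp only [List.length_cons]; omega

theorem skipQuoted_length (l r : List Char) (h : skipQuoted l = some r) :
    r.length < l.length :=
  skipQuoted_length_aux l.length l le_rfl r h

-- Source B's outer while loop of _strip_quoted: copy chars, deleting quoted literals.
def stripQuoted : List Char → Option (List Char)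
  | [] => some []
  | c :: rest =>
    if c == '"' then
      match h : skipQuoted rest with
      | none => none
      | some rest' => stripQuoted rest'
    else (stripQuoted rest).map (c :: ·)
termination_by l => l.length
decreasing_by
  · exact Nat.lt_succ_of_lt (skipQuoted_length _ _ h)
  · simp

-- Source B's brace-counting pass over the cleaned text.
def countBraces : List Char → Int → Bool
  | [], depth => depth == 0
  | c :: rest, depth =>
    if c == '{' then countBraces rest (depth + 1)
    else if c == '}' then
      if depth - 1 < 0 then false
      else countBraces rest (depth - 1)
    else countBraces rest depth

def is_balanced_braces_py_alt (value : String) : Bool :=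
  match stripQuoted value.toList with
  | none => false
  | some cleaned => countBraces cleaned 0

-- ===== PRECONDITION & SPEC =====
def Spec_is_balanced_braces_py (value : String) (out : Bool) : Prop := out = is_balanced_braces_py_alt value
instance (value : String) (out : Bool) : Decidable (Spec_is_balanced_braces_py value out) := by unfold Spec_is_balanced_braces_py; infer_instance

-- ===== CLAIM (what is proved, stated in full; the proofs are below) =====
def Claim_equal_is_balanced_braces_py : Prop := ∀ (value : String), Dom_is_balanced_braces_py value → Spec_is_balanced_braces_py value (is_balanced_braces_py value)

-- ===== LEMMAS AND PROOFS =====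

-- A's in-quote scan with a possibly pending escape, phrased as a suffix skip.
def skipQuotedE : Bool → List Char → Option (List Char)
  | true, [] => none
  | true, _ :: r => skipQuoted r
  | false, l => skipQuoted l

theorem stripQuoted_cons (c : Char) (rest : List Char) :
    stripQuoted (c :: rest) =
      if c == '"' then
        (match skipQuoted rest with
         | none => none
         | some rest' => stripQuoted rest')
      else (stripQuoted rest).map (c :: ·) := by
  by_cases hq : (c == '"') = true
  · rw [stripQuoted]
    simp only [hq, if_true]
    split <;> rename_i heq <;> simp [heq]
  · rw [stripQuoted]; simp [hq]

-- Inside a quoted literal, A's state machine agrees with skipping the literal.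
theorem loopA_quoteE (l : List Char) :
    ∀ (esc : Bool) (depth : Int),
      isBalancedLoopA l depth true esc =
        (match skipQuotedE esc l with
         | none => false
         | some rest => isBalancedLoopA rest depth false false) := by
  induction l with
  | nil => intro esc depth; cases esc <;> simp [isBalancedLoopA, skipQuotedE, skipQuoted]
  | cons c rest ih =>
      intro esc depth
      cases esc with
      | true =>
          have h := ih false depth
          simp only [skipQuotedE] at h ⊢
          simpa [isBalancedLoopA] using h
      | false =>
          by_cases h1 : c = '\\'
          · subst h1
            cases rest with
            | nil => simp [isBalancedLoopA, skipQuotedE, skipQuoted]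
            | cons d r =>
                have h := ih true depth
                simp only [skipQuotedE] at h
                simp only [skipQuotedE, skipQuoted]
                simpa [isBalancedLoopA] using h
          · by_cases h2 : c = '"'
            · subst h2
              simp only [skipQuotedE]
              rw [skipQuoted.eq_def]
              simp [isBalancedLoopA]
            · have h := ih false depth
              simp only [skipQuotedE] at h ⊢
              rw [skipQuoted.eq_def]
              simp only [isBalancedLoopA]
              simp [h1, h2, h]

theorem loopA_quote (l : List Char) (depth : Int) :
    isBalancedLoopA l depth true false =
      (match skipQuoted l with
       | none => false
       | some rest => isBalancedLoopA rest depth false false) := by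
  have h := loopA_quoteE l false depth
  simpa [skipQuotedE] using h

-- Main invariant: A's loop outside a quote equals strip-then-count.
theorem loopA_eq_strip_aux : ∀ (n : Nat) (l : List Char), l.length ≤ n →
    ∀ depth : Int, isBalancedLoopA l depth false false =
      (match stripQuoted l with
       | none => false
       | some cl => countBraces cl depth) := by
  intro n
  induction n with
  | zero =>
      intro l hl depth
      cases l with
      | nil => simp [isBalancedLoopA, stripQuoted, countBraces]
      | cons c rest => simp at hl
  | succ n ih =>
      intro l hl depth
      cases l with
      | nil => simp [isBalancedLoopA, stripQuoted, countBraces]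
      | cons c rest =>
          have hrest : rest.length ≤ n := by
            simp only [List.length_cons] at hl; omega
          rw [stripQuoted_cons]
          by_cases hq : c = '"'
          · subst hq
            have hL : isBalancedLoopA ('"' :: rest) depth false false =
                isBalancedLoopA rest depth true false := by
              simp [isBalancedLoopA]
            rw [hL, loopA_quote]
            simp only [beq_self_eq_true, if_true]
            cases hs : skipQuoted rest with
            | none => simp
            | some rest' =>
                have hlen : rest'.length ≤ n :=
                  le_trans (Nat.le_of_lt (skipQuoted_length rest rest' hs)) hrest
                simpa using ih rest' hlen depth
          · cases hs : stripQuoted rest with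
            | none =>
                by_cases h1 : c = '{'
                · simp [isBalancedLoopA, hq, h1, ih rest hrest (depth + 1), hs]
                · by_cases h2 : c = '}'
                  · by_cases h3 : depth - 1 < 0
                    · simp [isBalancedLoopA, hq, h1, h2, h3]
                    · simp [isBalancedLoopA, hq, h1, h2, h3, ih rest hrest (depth - 1), hs]
                  · simp [isBalancedLoopA, hq, h1, h2, ih rest hrest depth, hs]
            | some cl =>
                by_cases h1 : c = '{'
                · simp [isBalancedLoopA, hq, h1, ih rest hrest (depth + 1), hs, countBraces]
                · by_cases h2 : c = '}'
                  · by_cases h3 : depth - 1 < 0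
                    · simp [isBalancedLoopA, hq, h1, h2, h3, hs, countBraces]
                    · simp [isBalancedLoopA, hq, h1, h2, h3, ih rest hrest (depth - 1), hs,
                        countBraces]
                  · simp [isBalancedLoopA, hq, h1, h2, ih rest hrest depth, hs, countBraces]

-- ===== VERDICT (by name: the statement is the Claim_ definition above) =====
theorem is_balanced_braces_py_spec : Claim_equal_is_balanced_braces_py := by
  intro value _
  unfold Spec_is_balanced_braces_py is_balanced_braces_py is_balanced_braces_py_alt
  rw [loopA_eq_strip_aux value.toList.length value.toList le_rfl 0]
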